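-- pv_equiv track=rewrite | github.com/t-tsekov/codefights-solutions | arcade/the-core/spring-of-integration/cyclicString.py | cyclicString
-- ===== SOURCE A (Python) =====
-- def cyclicString(s):
--     end = 1
--     pattern = True
--     while end < len(s):
--         for i in range(len(s)-end):
--             if s[i+end] != s[i%end]:
--                 pattern = False
--                 continue
--         if pattern == True:
--             return end
--         pattern = True
--         end +=1
--     return end
-- ===== SOURCE B (Python) =====
-- def cyclicString(s):
--     n = len(s)
--     if n == 0:
--         return 1
--     pi = [0]
--     k = 0
--     for i in range(1, n):
--         while k > 0 and s[i] != s[k]: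
--             k = pi[k - 1]
--         if s[i] == s[k]:
--             k += 1
--         pi.append(k)
--     return n - pi[n - 1]
-- ===== Notes on version B (the rewrite author's own statement) =====
-- stated objective: faster
-- what changed: B computes the KMP prefix function in one linear pass and returns n - pi[n-1] (smallest period = n minus the longest proper border), replacing A's linear scan over candidate periods each verified by a full inner character loop.
import Mathlib
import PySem

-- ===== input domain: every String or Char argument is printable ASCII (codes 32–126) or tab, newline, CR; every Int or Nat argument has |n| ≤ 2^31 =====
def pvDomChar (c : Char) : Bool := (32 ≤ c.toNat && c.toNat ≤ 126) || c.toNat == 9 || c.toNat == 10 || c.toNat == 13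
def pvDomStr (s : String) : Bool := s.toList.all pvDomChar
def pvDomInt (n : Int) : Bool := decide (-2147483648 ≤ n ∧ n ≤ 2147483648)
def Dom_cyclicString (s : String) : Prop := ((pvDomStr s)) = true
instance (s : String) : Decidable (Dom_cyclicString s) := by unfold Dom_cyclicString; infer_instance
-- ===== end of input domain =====

-- B computes the KMP prefix function in one pass and returns n - pi[n-1]
-- (smallest period = n minus the longest proper border) instead of A's scan over
-- candidate periods, each verified by a full inner character loop (objective: faster).

-- ===== PORT A =====
-- while end < len(s): for i in range(len(s)-end): if s[i+end] != s[i%end]: pattern = False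
def pvALoop (l : List Char) (e : Nat) : Int :=
  if e < l.length then
    let pattern := (PySem.List.pyRange 0 ((l.length : Int) - (e : Int)) 1).foldl
      (fun pat i =>
        if PySem.List.pyGet? l (i + (e : Int)) ≠ PySem.List.pyGet? l (PySem.Int.mod i (e : Int))
        then false else pat) true
    if pattern then (e : Int) else pvALoop l (e + 1)
  else (e : Int)
termination_by l.length - e

def cyclicString (s : String) : Int := pvALoop s.toList 1

-- ===== PORT B =====
-- inner 'while k > 0 and s[i] != s[k]: k = pi[k-1]' — fuel (= entry k) only makes the
-- recursion structurally total; it is never exhausted since k strictly decreases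
def pvFall (l : List Char) (pi : List Nat) (c : Option Char) : Nat → Nat → Nat
  | 0, k => k
  | fuel + 1, k =>
    if 0 < k ∧ c ≠ PySem.List.pyGet? l (k : Int) then
      pvFall l pi c fuel ((PySem.List.pyGet? pi ((k : Int) - 1)).getD 0)
    else k

-- loop body: fall, then 'if s[i] == s[k]: k += 1'
def pvStep (l : List Char) (pi : List Nat) (k i : Nat) : Nat :=
  let k1 := pvFall l pi (PySem.List.pyGet? l (i : Int)) k k
  if PySem.List.pyGet? l (i : Int) = PySem.List.pyGet? l (k1 : Int) then k1 + 1 else k1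

-- for i in range(1, n): body; pi.append(k)
def pvKmpLoop (l : List Char) (pi : List Nat) (k i : Nat) : List Nat :=
  if i < l.length then
    pvKmpLoop l (pi ++ [pvStep l pi k i]) (pvStep l pi k i) (i + 1)
  else pi
termination_by l.length - i

def cyclicString_alt (s : String) : Int :=
  let l := s.toList
  let n := l.length
  if n = 0 then 1
  else
    let pi := pvKmpLoop l [0] 0 1
    (n : Int) - (((PySem.List.pyGet? pi ((n : Int) - 1)).getD 0 : Nat) : Int)

-- ===== PRECONDITION & SPEC =====
def Spec_cyclicString (s : String) (out : Int) : Prop := out = cyclicString_alt s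
instance (s : String) (out : Int) : Decidable (Spec_cyclicString s out) := by unfold Spec_cyclicString; infer_instance

-- ===== CLAIM (what is proved, stated in full; the proofs are below) =====
def Claim_equal_cyclicString : Prop := ∀ (s : String), Dom_cyclicString s → Spec_cyclicString s (cyclicString s)

-- ===== LEMMAS AND PROOFS =====

-- b is a (proper) border of the prefix of length m of l
@[reducible] def Brd (l : List Char) (m b : Nat) : Prop :=
  b < m ∧ ∀ j < b, l[j]? = l[m - b + j]?

-- longest proper border of the prefix of length m
def Fb (l : List Char) (m : Nat) : Nat :=
  Nat.findGreatest (fun b => Brd l m b) (m - 1)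

lemma brd_zero (l : List Char) (m : Nat) (h : 0 < m) : Brd l m 0 := ⟨h, by omega⟩

-- border nesting: inside a border k of prefix m, b < k is a border of prefix m iff of prefix k
lemma brd_trans (l : List Char) (m k b : Nat) (hk : Brd l m k) (hbk : b < k) :
    (Brd l m b ↔ Brd l k b) := by
  obtain ⟨hkm, hkeq⟩ := hk
  constructor
  · rintro ⟨hbm, hbeq⟩
    refine ⟨hbk, fun j hj => ?_⟩
    have h1 := hbeq j hj
    have h2 := hkeq (k - b + j) (by omega)
    rw [show m - k + (k - b + j) = m - b + j by omega] at h2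
    rw [h1, ← h2]
  · rintro ⟨_, hbeq⟩
    refine ⟨by omega, fun j hj => ?_⟩
    have h1 := hbeq j hj
    have h2 := hkeq (k - b + j) (by omega)
    rw [show m - k + (k - b + j) = m - b + j by omega] at h2
    rw [h1, h2]

lemma brd_Fb (l : List Char) (m : Nat) (h : 0 < m) : Brd l m (Fb l m) :=
  Nat.findGreatest_spec (P := fun b => Brd l m b) (m := 0)
    (Nat.zero_le (m - 1)) (brd_zero l m h)

lemma Fb_le (l : List Char) (m : Nat) : Fb l m ≤ m - 1 := Nat.findGreatest_le _

lemma le_Fb (l : List Char) (m b : Nat) (hb : Brd l m b) : b ≤ Fb l m :=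
  Nat.le_findGreatest (by have := hb.1; omega) hb

-- extension: k+1 is a border of prefix i+1 iff k is a border of prefix i and the chars match
lemma brd_succ (l : List Char) (i k : Nat) (hi : 0 < i) :
    Brd l (i + 1) (k + 1) ↔ Brd l i k ∧ l[k]? = l[i]? := by
  constructor
  · rintro ⟨hlt, heq⟩
    have hk : k < i := by omega
    refine ⟨⟨hk, fun j hj => ?_⟩, ?_⟩
    · have := heq j (by omega)
      rwa [show i + 1 - (k + 1) + j = i - k + j by omega] at this
    · have := heq k (by omega)
      rwa [show i + 1 - (k + 1) + k = i by omega] at this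
  · rintro ⟨⟨hk, heq⟩, hc⟩
    refine ⟨by omega, fun j hj => ?_⟩
    rcases Nat.lt_or_ge j k with h | h
    · have := heq j h
      rwa [show i - k + j = i + 1 - (k + 1) + j by omega] at this
    · have hjk : j = k := by omega
      rw [hjk, show i + 1 - (k + 1) + k = i by omega]
      exact hc

-- the fall-loop invariant: k is a border of prefix i bounding every extendable border
def FallInv (l : List Char) (i k : Nat) : Prop :=
  Brd l i k ∧ ∀ b, Brd l i b → l[b]? = l[i]? → b ≤ k

-- the pi table is correct up to its length
def PiOk (l : List Char) (pi : List Nat) : Prop :=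
  ∀ m, m < pi.length → pi[m]? = some (Fb l (m + 1))

lemma fall_spec (l : List Char) (pi : List Nat) (i : Nat) (hi : 0 < i)
    (hlen : i ≤ pi.length) (hpi : PiOk l pi) :
    ∀ fuel k, k ≤ fuel → FallInv l i k →
      ∀ r, r = pvFall l pi (l[i]?) fuel k →
        FallInv l i r ∧ (r = 0 ∨ l[r]? = l[i]?) := by
  intro fuel
  induction fuel with
  | zero =>
      intro k hk hinv r hr
      have hk0 : k = 0 := by omega
      subst hk0
      rw [pvFall] at hr
      subst hr
      exact ⟨hinv, Or.inl rfl⟩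
  | succ fuel ih =>
      intro k hk hinv r hr
      rw [pvFall] at hr
      by_cases hcond : 0 < k ∧ l[i]? ≠ PySem.List.pyGet? l (k : Int)
      · rw [if_pos hcond] at hr
        obtain ⟨hk0, hne⟩ := hcond
        rw [PySem.List.pyGet?_natCast] at hne
        have hki : k < i := hinv.1.1
        have hgd : ((k : Int) - 1) = ((k - 1 : Nat) : Int) := by omega
        have hget : (PySem.List.pyGet? pi ((k : Int) - 1)).getD 0 = Fb l k := by
          rw [hgd, PySem.List.pyGet?_natCast, hpi (k - 1) (by omega)]
          simp [show k - 1 + 1 = k by omega]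
        rw [hget] at hr
        have hFbk : Fb l k ≤ k - 1 := Fb_le l k
        have hbrdk : Brd l k (Fb l k) := brd_Fb l k hk0
        have hnew : FallInv l i (Fb l k) := by
          constructor
          · rcases Nat.eq_zero_or_pos (Fb l k) with h0 | hpos
            · rw [h0]; exact brd_zero l i hi
            · exact (brd_trans l i k (Fb l k) hinv.1 (by omega)).mpr hbrdk
          · intro b hb hbc
            have hble : b ≤ k := hinv.2 b hb hbc
            have hbk : b < k := by
              rcases Nat.lt_or_ge b k with h | h
              · exact h
              · have hbe : b = k := by omega
                subst hbe
                exact absurd hbc.symm hne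
            exact le_Fb l k b ((brd_trans l i k b hinv.1 hbk).mp hb)
        exact ih (Fb l k) (by omega) hnew r hr
      · rw [if_neg hcond] at hr
        rw [hr]
        refine ⟨hinv, ?_⟩
        rcases Nat.eq_zero_or_pos k with h0 | hpos
        · exact Or.inl h0
        · right
          by_contra hne
          exact hcond ⟨hpos, by rw [PySem.List.pyGet?_natCast]; exact fun h => hne h.symm⟩

-- one outer step: from k = Fb l i the loop body computes Fb l (i+1)
lemma step_spec (l : List Char) (pi : List Nat) (i : Nat) (hi : 0 < i) (hin : i < l.length)
    (hlen : i ≤ pi.length) (hpi : PiOk l pi) :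
    pvStep l pi (Fb l i) i = Fb l (i + 1) := by
  have hinv0 : FallInv l i (Fb l i) :=
    ⟨brd_Fb l i hi, fun b hb _ => le_Fb l i b hb⟩
  obtain ⟨hinv, hexit⟩ := fall_spec l pi i hi hlen hpi (Fb l i) (Fb l i) le_rfl hinv0
    (pvFall l pi (l[i]?) (Fb l i) (Fb l i)) rfl
  unfold pvStep
  rw [PySem.List.pyGet?_natCast]
  set r := pvFall l pi (l[i]?) (Fb l i) (Fb l i) with hr
  show (if l[i]? = PySem.List.pyGet? l (r : Int) then r + 1 else r) = Fb l (i + 1)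
  rw [PySem.List.pyGet?_natCast]
  by_cases hmatch : l[i]? = l[r]?
  · rw [if_pos hmatch]
    have hext : Brd l (i + 1) (r + 1) :=
      (brd_succ l i r hi).mpr ⟨hinv.1, hmatch.symm⟩
    have hle : r + 1 ≤ Fb l (i + 1) := le_Fb l (i + 1) (r + 1) hext
    have hge : Fb l (i + 1) ≤ r + 1 := by
      have hb := brd_Fb l (i + 1) (by omega)
      rcases Nat.eq_zero_or_pos (Fb l (i + 1)) with h0 | hpos
      · omega
      · obtain ⟨b, hbeq⟩ : ∃ b, Fb l (i + 1) = b + 1 := ⟨Fb l (i + 1) - 1, by omega⟩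
        rw [hbeq] at hb
        obtain ⟨hbrd, hc⟩ := (brd_succ l i b hi).mp hb
        have := hinv.2 b hbrd hc
        omega
    omega
  · rw [if_neg hmatch]
    have hr0 : r = 0 := by
      rcases hexit with h | h
      · exact h
      · exact absurd h.symm hmatch
    rw [hr0]
    by_contra hne
    have hpos : 0 < Fb l (i + 1) := Nat.pos_of_ne_zero (fun h => hne h.symm)
    obtain ⟨b, hbeq⟩ : ∃ b, Fb l (i + 1) = b + 1 := ⟨Fb l (i + 1) - 1, by omega⟩
    have hb := brd_Fb l (i + 1) (by omega)
    rw [hbeq] at hb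
    obtain ⟨hbrd, hc⟩ := (brd_succ l i b hi).mp hb
    have hble : b ≤ r := hinv.2 b hbrd hc
    have hb0 : b = 0 := by omega
    subst hb0
    rw [hr0] at hmatch
    exact hmatch hc.symm

lemma kmp_loop_spec (l : List Char) :
    ∀ d i pi, l.length - i = d → 0 < i → i ≤ l.length → pi.length = i → PiOk l pi →
      (pvKmpLoop l pi (Fb l i) i).length = l.length ∧
        PiOk l (pvKmpLoop l pi (Fb l i) i) := by
  intro d
  induction d with
  | zero =>
      intro i pi hd hi hile hlen hpi
      rw [pvKmpLoop, if_neg (by omega)]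
      exact ⟨by omega, hpi⟩
  | succ d ih =>
      intro i pi hd hi hile hlen hpi
      have hin : i < l.length := by omega
      rw [pvKmpLoop, if_pos hin]
      rw [step_spec l pi i hi hin (by omega) hpi]
      have hpi' : PiOk l (pi ++ [Fb l (i + 1)]) := by
        intro m hm
        rw [List.length_append, List.length_cons, List.length_nil] at hm
        rcases Nat.lt_or_ge m pi.length with h | h
        · rw [List.getElem?_append_left h]
          exact hpi m h
        · have hme : m = pi.length := by omega
          subst hme
          rw [List.getElem?_append_right le_rfl]
          simp [hlen]
      exact ih (i + 1) (pi ++ [Fb l (i + 1)]) (by omega) (by omega) (by omega)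
        (by simp [hlen]) hpi'

-- ===== A-side characterisation (flag fold + modular test) =====

def PA (l : List Char) (e : Nat) : Prop :=
  ∀ k : Nat, k < l.length - e → l[k + e]? = l[k % e]?

def PB (l : List Char) (p : Nat) : Prop :=
  ∀ k : Nat, k < l.length - p → l[k + p]? = l[k]?

lemma flag_fold (c : Int → Prop) [DecidablePred c] :
    ∀ (L : List Int) (b : Bool),
      (L.foldl (fun pat i => if c i then false else pat) b = true)
        ↔ (b = true ∧ ∀ i ∈ L, ¬ c i) := by
  intro L
  induction L with
  | nil => intro b; simp
  | cons x xs ih =>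
      intro b
      simp only [List.foldl_cons]
      by_cases h : c x
      · rw [if_pos h, ih]
        simp [h]
      · rw [if_neg h, ih]
        simp [h]

lemma PB_mod (l : List Char) (p : Nat) (hp : 1 ≤ p) (hPB : PB l p) :
    ∀ j : Nat, p ≤ j → j < l.length → l[j]? = l[j % p]? := by
  intro j
  induction j using Nat.strong_induction_on with
  | _ j ih =>
    intro hpj hjn
    have h1 : l[j]? = l[j - p]? := by
      have := hPB (j - p) (by omega)
      rwa [Nat.sub_add_cancel hpj] at this
    have hmod : j % p = (j - p) % p := by
      conv_lhs => rw [show j = p + (j - p) by omega]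
      exact Nat.add_mod_left p (j - p)
    by_cases h2 : j - p < p
    · rw [h1, hmod, Nat.mod_eq_of_lt h2]
    · rw [h1, hmod]
      exact ih (j - p) (by omega) (by omega) (by omega)

lemma PA_iff_PB (l : List Char) (p : Nat) (hp : 1 ≤ p) : PA l p ↔ PB l p := by
  constructor
  · intro hPA k hk
    rw [hPA k hk]
    by_cases h : k < p
    · rw [Nat.mod_eq_of_lt h]
    · have h1 := hPA (k - p) (by omega)
      rw [Nat.sub_add_cancel (by omega)] at h1
      have hmod : k % p = (k - p) % p := by
        conv_lhs => rw [show k = p + (k - p) by omega]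
        exact Nat.add_mod_left p (k - p)
      rw [h1, hmod]
  · intro hPB k hk
    have := PB_mod l p hp hPB (k + p) (by omega) (by omega)
    rwa [Nat.add_mod_right] at this

lemma pattern_iff_PA (l : List Char) (e : Nat) (hen : e < l.length) :
    ((PySem.List.pyRange 0 ((l.length : Int) - (e : Int)) 1).foldl
      (fun pat i =>
        if PySem.List.pyGet? l (i + (e : Int)) ≠ PySem.List.pyGet? l (PySem.Int.mod i (e : Int))
        then false else pat) true = true) ↔ PA l e := by
  rw [flag_fold (fun i => PySem.List.pyGet? l (i + (e : Int)) ≠ PySem.List.pyGet? l (PySem.Int.mod i (e : Int)))]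
  simp only [true_and]
  constructor
  · intro h k hk
    have hmem : ((k : Int)) ∈ PySem.List.pyRange 0 ((l.length : Int) - (e : Int)) 1 := by
      rw [PySem.List.mem_pyRange_one]; omega
    have := h _ hmem
    simp only [ne_eq, Decidable.not_not] at this
    have hadd : (k : Int) + (e : Int) = ((k + e : Nat) : Int) := by push_cast; ring
    rw [hadd, PySem.Int.mod_natCast, PySem.List.pyGet?_natCast, PySem.List.pyGet?_natCast] at this
    exact this
  · intro h i hmem
    rw [PySem.List.mem_pyRange_one] at hmem
    obtain ⟨k, rfl⟩ : ∃ k : Nat, i = (k : Int) := ⟨i.toNat, by omega⟩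
    have hk : k < l.length - e := by omega
    have := h k hk
    have hadd : (k : Int) + (e : Int) = ((k + e : Nat) : Int) := by push_cast; ring
    simp only [ne_eq, Decidable.not_not]
    rw [hadd, PySem.Int.mod_natCast, PySem.List.pyGet?_natCast, PySem.List.pyGet?_natCast]
    exact this

-- period p of l (1 ≤ p < n) ↔ border of length n - p
lemma PB_iff_brd (l : List Char) (p : Nat) (hp : 1 ≤ p) (hpn : p < l.length) :
    PB l p ↔ Brd l l.length (l.length - p) := by
  constructor
  · intro h
    refine ⟨by omega, fun j hj => ?_⟩
    have := h j (by omega)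
    rw [show l.length - (l.length - p) + j = j + p by omega]
    exact this.symm
  · rintro ⟨_, heq⟩
    intro k hk
    have := heq k (by omega)
    rw [show l.length - (l.length - p) + k = k + p by omega] at this
    exact this.symm

-- A's loop returns n - Fb l n
lemma aloop_eq (l : List Char) (hn : 0 < l.length) :
    ∀ d k, (l.length - Fb l l.length) - k = d → 1 ≤ k → k ≤ l.length - Fb l l.length →
      pvALoop l k = ((l.length - Fb l l.length : Nat) : Int) := by
  have hFb : Fb l l.length ≤ l.length - 1 := Fb_le l l.length
  intro d
  induction d with
  | zero =>
      intro k hd h1 hle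
      have hk : k = l.length - Fb l l.length := by omega
      subst hk
      by_cases hlt : l.length - Fb l l.length < l.length
      · rw [pvALoop, if_pos hlt]
        have hPB : PB l (l.length - Fb l l.length) := by
          rw [PB_iff_brd l _ (by omega) hlt,
            show l.length - (l.length - Fb l l.length) = Fb l l.length by omega]
          exact brd_Fb l l.length hn
        rw [if_pos ((pattern_iff_PA l _ hlt).mpr ((PA_iff_PB l _ (by omega)).mpr hPB))]
      · rw [pvALoop, if_neg hlt]
  | succ d ih =>
      intro k hd h1 hle
      have hklt : k < l.length - Fb l l.length := by omega
      have hkn : k < l.length := by omega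
      rw [pvALoop, if_pos hkn]
      have hnPB : ¬ PB l k := by
        intro hPB
        have := le_Fb l l.length (l.length - k) ((PB_iff_brd l k h1 hkn).mp hPB)
        omega
      rw [if_neg (fun h => hnPB ((PA_iff_PB l k h1).mp ((pattern_iff_PA l k hkn).mp h)))]
      exact ih (k + 1) (by omega) (by omega) (by omega)

-- ===== VERDICT (by name: the statement is the Claim_ definition above) =====
theorem cyclicString_spec : Claim_equal_cyclicString := by
  intro s _
  unfold Spec_cyclicString cyclicString cyclicString_alt
  simp only
  set l := s.toList with hl
  by_cases hn : l.length = 0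
  · rw [if_pos hn, pvALoop, if_neg (by omega)]
    norm_num
  · rw [if_neg hn]
    have hn1 : 0 < l.length := by omega
    have hFb1 : Fb l 1 = 0 := rfl
    have hkmp := kmp_loop_spec l (l.length - 1) 1 [0] (by omega) (by omega) hn1 rfl
      (by
        intro m hm
        simp only [List.length_cons, List.length_nil] at hm
        have hm0 : m = 0 := by omega
        subst hm0
        simp [hFb1])
    rw [hFb1] at hkmp
    obtain ⟨hlen, hok⟩ := hkmp
    have hcast : ((l.length : Int) - 1) = ((l.length - 1 : Nat) : Int) := by omega
    have hget : (PySem.List.pyGet? (pvKmpLoop l [0] 0 1) ((l.length : Int) - 1)).getD 0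
        = Fb l l.length := by
      rw [hcast, PySem.List.pyGet?_natCast, hok (l.length - 1) (by omega)]
      simp [show l.length - 1 + 1 = l.length by omega]
    rw [hget]
    rw [aloop_eq l hn1 ((l.length - Fb l l.length) - 1) 1 rfl le_rfl
      (by have := Fb_le l l.length; omega)]
    have := Fb_le l l.length
    omega
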